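-- pv_equiv track=rewrite | github.com/KsenyaNikitchenko/laboraatornaya1 | task1.py | nsimplenums
-- ===== SOURCE A (Python) =====
-- def maxod(x,y):
--     while(x!=0 and y!=0):
--         if x>y:
--             x%=y
--         else:
--             y%=x
--     return x+y
--
-- def nsimplenums(x):
--     n=0
--     i=2
--     while i<x:
--         if maxod(x,i)!=1:
--             n+=1
--         i+=2
--     return n
-- ===== SOURCE B (Python) =====
-- def nsimplenums(x):
--     # Count even i in [2, x) with gcd(x, i) != 1.
--     if x <= 2:
--         return 0
--     half = (x - 1) // 2          # number of even i in [2, x)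
--     if x % 2 == 0:
--         return half              # every even i shares the factor 2 with x
--     # x odd: gcd(x, 2k) = gcd(x, k), so subtract the count of k in [1, half] coprime to x
--     coprime = 0
--     for k in range(1, half + 1):
--         a, b = x, k
--         while b:
--             a, b = b, a % b
--         if a == 1:
--             coprime += 1
--     return half - coprime
-- ===== Notes on version B (the rewrite author's own statement) =====
-- stated objective: faster
-- what changed: A runs a subtraction/mod Euclid over every even i in [2,x); B answers even x in O(1) with the closed form (x-1)//2 and, for odd x, counts the complement (k in [1,(x-1)//2] coprime to x, using gcd(x,2k)=gcd(x,k)) over a half-sized range with smaller gcd arguments.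
import Mathlib
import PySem

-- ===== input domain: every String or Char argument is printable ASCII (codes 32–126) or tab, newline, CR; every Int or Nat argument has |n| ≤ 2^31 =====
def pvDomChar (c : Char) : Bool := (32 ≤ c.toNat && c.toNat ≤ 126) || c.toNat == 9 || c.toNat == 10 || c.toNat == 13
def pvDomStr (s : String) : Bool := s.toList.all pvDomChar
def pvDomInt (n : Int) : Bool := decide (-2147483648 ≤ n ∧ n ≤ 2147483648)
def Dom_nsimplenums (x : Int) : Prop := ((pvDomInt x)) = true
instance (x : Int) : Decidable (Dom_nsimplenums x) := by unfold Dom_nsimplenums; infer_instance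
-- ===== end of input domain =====

-- B replaces A's per-element gcd scan over all even i < x by a closed form for even x
-- and, for odd x, a half-range complement count of k coprime to x (objective: faster).

-- ===== PORT A =====
-- Python's `maxod` while-loop, fuel-indexed: the fuel |x|+|y|+1 chosen below strictly
-- exceeds the number of iterations for the nonnegative arguments nsimplenums supplies
-- (each iteration strictly decreases x+y while both stay ≥ 0), so the 0-fuel branch is unreached there.
def maxodAux : Nat → Int → Int → Int
  | 0, x, y => x + y
  | fuel+1, x, y =>
    if x ≠ 0 ∧ y ≠ 0 then
      if x > y then maxodAux fuel (PySem.Int.mod x y) y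
      else maxodAux fuel x (PySem.Int.mod y x)
    else x + y

def maxod (x y : Int) : Int := maxodAux (x.natAbs + y.natAbs + 1) x y

-- the `while i < x` loop of A, carrying the counter n
def nsimplenumsLoop (x i n : Int) : Int :=
  if i < x then nsimplenumsLoop x (i + 2) (if maxod x i ≠ 1 then n + 1 else n) else n
termination_by (x - i).toNat
decreasing_by omega

def nsimplenums (x : Int) : Int := nsimplenumsLoop x 2 0

-- ===== PORT B =====
-- Source B's inner Euclid loop `while b: a, b = b, a % b`, fuel-indexed; fuel |b|+1 exceeds
-- the iteration count for the nonnegative arguments nsimplenums_alt supplies.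
def gcdLoopAux : Nat → Int → Int → Int
  | 0, a, _ => a
  | fuel+1, a, b => if b ≠ 0 then gcdLoopAux fuel b (PySem.Int.mod a b) else a

def gcdLoop (a b : Int) : Int := gcdLoopAux (b.natAbs + 1) a b

def nsimplenums_alt (x : Int) : Int :=
  if x ≤ 2 then 0
  else
    let half := PySem.Int.floordiv (x - 1) 2
    if PySem.Int.mod x 2 = 0 then half
    else
      let coprime := (PySem.List.pyRange 1 (half + 1) 1).foldl
        (fun c k => if gcdLoop x k = 1 then c + 1 else c) 0
      half - coprime

-- ===== PRECONDITION & SPEC =====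
def Spec_nsimplenums (x : Int) (out : Int) : Prop := out = nsimplenums_alt x
instance (x : Int) (out : Int) : Decidable (Spec_nsimplenums x out) := by unfold Spec_nsimplenums; infer_instance

-- ===== CLAIM (what is proved, stated in full; the proofs are below) =====
def Claim_equal_nsimplenums : Prop := ∀ (x : Int), Dom_nsimplenums x → Spec_nsimplenums x (nsimplenums x)

-- ===== LEMMAS AND PROOFS =====

-- B's Euclid loop computes gcd on nonnegative arguments (fuel sufficient)
theorem gcdLoopAux_eq_gcd (fuel : Nat) : ∀ (a b : Int), 0 ≤ a → 0 ≤ b → b.natAbs < fuel →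
    gcdLoopAux fuel a b = ↑(Int.gcd a b) := by
  induction fuel with
  | zero => intro a b _ _ h; omega
  | succ f ih =>
    intro a b ha hb hf
    simp only [gcdLoopAux]
    by_cases h : b = 0
    · simp [h, Int.natAbs_of_nonneg ha]
    · have hbpos : 0 < b := lt_of_le_of_ne hb (Ne.symm h)
      rw [if_pos h, PySem.Int.mod_eq_emod_of_pos hbpos]
      have hm0 : 0 ≤ a % b := Int.emod_nonneg a h
      have hmlt : a % b < b := Int.emod_lt_of_pos a hbpos
      rw [ih b (a % b) hb hm0 (by omega), Int.gcd_comm, Int.gcd_emod]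

theorem gcdLoop_eq_gcd (a b : Int) (ha : 0 ≤ a) (hb : 0 ≤ b) : gcdLoop a b = ↑(Int.gcd a b) :=
  gcdLoopAux_eq_gcd _ a b ha hb (by omega)

-- A's subtraction-free Euclid (`maxod`) also computes gcd on nonnegative arguments
theorem maxodAux_eq_gcd (fuel : Nat) : ∀ (x y : Int), 0 ≤ x → 0 ≤ y → x.natAbs + y.natAbs ≤ fuel →
    maxodAux fuel x y = ↑(Int.gcd x y) := by
  induction fuel with
  | zero =>
    intro x y hx hy h
    have hx0 : x = 0 := by omega
    have hy0 : y = 0 := by omega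
    simp [maxodAux, hx0, hy0]
  | succ f ih =>
    intro x y hx hy hf
    simp only [maxodAux]
    by_cases hx0 : x = 0
    · simp [hx0, Int.natAbs_of_nonneg hy]
    · by_cases hy0 : y = 0
      · simp [hy0, Int.natAbs_of_nonneg hx]
      · rw [if_pos ⟨hx0, hy0⟩]
        have hxpos : 0 < x := lt_of_le_of_ne hx (Ne.symm hx0)
        have hypos : 0 < y := lt_of_le_of_ne hy (Ne.symm hy0)
        by_cases hgt : x > y
        · rw [if_pos hgt, PySem.Int.mod_eq_emod_of_pos hypos]
          have hm0 : 0 ≤ x % y := Int.emod_nonneg x hy0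
          have hmlt : x % y < y := Int.emod_lt_of_pos x hypos
          rw [ih (x % y) y hm0 hy (by omega), Int.gcd_emod]
        · rw [if_neg hgt, PySem.Int.mod_eq_emod_of_pos hxpos]
          have hm0 : 0 ≤ y % x := Int.emod_nonneg y hx0
          have hmlt : y % x < x := Int.emod_lt_of_pos y hxpos
          rw [ih x (y % x) hx hm0 (by omega), Int.gcd_comm, Int.gcd_emod, Int.gcd_comm]

theorem maxod_eq_gcd (x y : Int) (hx : 0 ≤ x) (hy : 0 ≤ y) : maxod x y = ↑(Int.gcd x y) :=
  maxodAux_eq_gcd _ x y hx hy (by omega)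

-- count of j in [k, h] with gcd x j = 1 (mathematical shape of B's fold)
def copCnt (x k h : Int) : Int :=
  if k ≤ h then (if Int.gcd x k = 1 then 1 else 0) + copCnt x (k + 1) h else 0
termination_by (h + 1 - k).toNat
decreasing_by omega

-- for odd x, gcd x (2k) = gcd x k
theorem gcd_two_mul_of_odd (x k : Int) (hodd : x % 2 = 1) : Int.gcd x (2 * k) = Int.gcd x k := by
  have h2 : (2 * k).natAbs = 2 * k.natAbs := by
    simpa using Int.natAbs_mul 2 k
  have hco : Nat.Coprime 2 x.natAbs := by
    rw [Nat.coprime_two_left, Nat.odd_iff]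
    omega
  rw [Int.gcd_def, Int.gcd_def, h2, Nat.gcd_comm, Nat.Coprime.gcd_mul_left_cancel _ hco,
    Nat.gcd_comm]

-- B's fold over range(1, half+1) accumulates copCnt
theorem foldl_eq_copCnt (x h : Int) (hx : 0 ≤ x) : ∀ (m : Nat) (k c : Int), 0 ≤ k → (h + 1 - k).toNat = m →
    (PySem.List.pyRange k (h + 1) 1).foldl (fun c j => if gcdLoop x j = 1 then c + 1 else c) c
      = c + copCnt x k h := by
  intro m
  induction m with
  | zero =>
    intro k c hk hm
    have hkh : ¬ k ≤ h := by omega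
    rw [PySem.List.pyRange_one, copCnt]
    simp [hm, hkh]
  | succ m ih =>
    intro k c hk hm
    have hkh : k < h + 1 := by omega
    rw [PySem.List.pyRange_one_cons hkh, copCnt, if_pos (by omega : k ≤ h)]
    simp only [List.foldl_cons]
    rw [gcdLoop_eq_gcd x k hx hk]
    have hcast : ((Int.gcd x k : Int) = 1) ↔ Int.gcd x k = 1 := by
      constructor <;> intro hh <;> exact_mod_cast hh
    rw [ih (k + 1) (if (Int.gcd x k : Int) = 1 then c + 1 else c) (by omega) (by omega)]
    by_cases hg : Int.gcd x k = 1
    · rw [if_pos (hcast.mpr hg), if_pos hg]; ring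
    · rw [if_neg (fun hh => hg (hcast.mp hh)), if_neg hg]; ring

-- A's loop for even x ≥ 3: every even i shares the factor 2 with x, so it counts all of them
theorem loop_even (x : Int) (hx3 : 3 ≤ x) (hev : x % 2 = 0) : ∀ (m : Nat) (k n : Int), 1 ≤ k →
    k ≤ (x - 1) / 2 + 1 → (x - 2 * k).toNat = m →
    nsimplenumsLoop x (2 * k) n = n + ((x - 1) / 2 + 1 - k) := by
  intro m
  induction m using Nat.strong_induction_on with
  | _ m ih =>
    intro k n hk1 hk2 hm
    by_cases hlt : 2 * k < x
    · rw [nsimplenumsLoop, if_pos hlt,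
        show 2 * k + 2 = 2 * (k + 1) by ring]
      have hg2 : 2 ∣ Int.gcd x (2 * k) := by
        refine Nat.dvd_gcd ?_ ?_
        · omega
        · have : (2 * k).natAbs = 2 * k.natAbs := by simpa using Int.natAbs_mul 2 k
          omega
      have hne : maxod x (2 * k) ≠ 1 := by
        rw [maxod_eq_gcd x (2 * k) (by omega) (by omega)]
        intro hh
        have : Int.gcd x (2 * k) = 1 := by exact_mod_cast hh
        omega
      rw [if_pos hne, ih (x - 2 * (k + 1)).toNat (by omega) (k + 1) (n + 1) (by omega) (by omega) rfl]
      omega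
    · rw [nsimplenumsLoop, if_neg hlt]
      omega

-- A's loop for odd x ≥ 3: gcd x (2j) = gcd x j, so it counts half minus the coprime j
theorem loop_odd (x : Int) (hx3 : 3 ≤ x) (hodd : x % 2 = 1) : ∀ (m : Nat) (k n : Int), 1 ≤ k →
    k ≤ (x - 1) / 2 + 1 → (x - 2 * k).toNat = m →
    nsimplenumsLoop x (2 * k) n = n + ((x - 1) / 2 + 1 - k) - copCnt x k ((x - 1) / 2) := by
  intro m
  induction m using Nat.strong_induction_on with
  | _ m ih =>
    intro k n hk1 hk2 hm
    by_cases hlt : 2 * k < x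
    · rw [copCnt, if_pos (by omega : k ≤ (x - 1) / 2)]
      rw [nsimplenumsLoop, if_pos hlt,
        show 2 * k + 2 = 2 * (k + 1) by ring]
      have hmx : maxod x (2 * k) = ↑(Int.gcd x k) := by
        rw [maxod_eq_gcd x (2 * k) (by omega) (by omega), gcd_two_mul_of_odd x k hodd]
      rw [hmx, ih (x - 2 * (k + 1)).toNat (by omega) (k + 1)
        (if (Int.gcd x k : Int) ≠ 1 then n + 1 else n) (by omega) (by omega) rfl]
      generalize copCnt x (k + 1) ((x - 1) / 2) = C
      by_cases hg : Int.gcd x k = 1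
      · rw [if_neg (by simp [hg]), if_pos hg]; omega
      · have hgi : (Int.gcd x k : Int) ≠ 1 := fun hh => hg (by exact_mod_cast hh)
        rw [if_pos hgi, if_neg hg]; omega
    · rw [nsimplenumsLoop, if_neg hlt, copCnt, if_neg (by omega : ¬ k ≤ (x - 1) / 2)]
      omega

-- ===== VERDICT (by name: the statement is the Claim_ definition above) =====
theorem nsimplenums_spec : Claim_equal_nsimplenums := by
  intro x _
  unfold Spec_nsimplenums nsimplenums nsimplenums_alt
  by_cases hx : x ≤ 2
  · rw [nsimplenumsLoop, if_neg (by omega : ¬ 2 < x), if_pos hx]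
  · rw [if_neg hx]
    have hx3 : 3 ≤ x := by omega
    have hfd : PySem.Int.floordiv (x - 1) 2 = (x - 1) / 2 :=
      PySem.Int.floordiv_eq_ediv_of_pos (by norm_num)
    have hmd : PySem.Int.mod x 2 = x % 2 := PySem.Int.mod_eq_emod_of_pos (by norm_num)
    simp only [hfd, hmd]
    by_cases he : x % 2 = 0
    · rw [if_pos he]
      have hl := loop_even x hx3 he (x - 2 * 1).toNat 1 0 (by omega) (by omega) rfl
      norm_num at hl
      rw [hl]
    · have hodd : x % 2 = 1 := by omega
      rw [if_neg he]
      have hl := loop_odd x hx3 hodd (x - 2 * 1).toNat 1 0 (by omega) (by omega) rfl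
      norm_num at hl
      have hf := foldl_eq_copCnt x ((x - 1) / 2) (by omega : (0:Int) ≤ x)
        ((x - 1) / 2 + 1 - 1).toNat 1 0 (by omega) rfl
      rw [hl, hf]
      generalize copCnt x 1 ((x - 1) / 2) = C
      omega
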